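-- pv_equiv track=rewrite | github.com/WangZhSi/Bioinformatics_tool | convert_agp/convert_agp.py | reorder_pos
-- ===== SOURCE A (Python) =====
-- def reorder_pos(contigs: list) -> list:
--     new_contigs = []
--     current_chrom = None
--     current_pos = 1
--     for chrom, contig, strand, pos in contigs:
--         if chrom != current_chrom:
--             current_chrom = chrom
--             current_pos = 1
--         new_contigs.append((chrom, contig, strand, current_pos))
--         current_pos += 1
--     return new_contigs
-- ===== SOURCE B (Python) =====
-- def reorder_pos(contigs: list) -> list:
--     new_contigs = []
--     i = 0
--     n = len(contigs)
--     while i < n: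
--         key = contigs[i][0]
--         j = i
--         while j < n and contigs[j][0] == key:
--             j += 1
--         for idx, (chrom, contig, strand, _pos) in enumerate(contigs[i:j], 1):
--             new_contigs.append((chrom, contig, strand, idx))
--         i = j
--     return new_contigs
-- ===== Notes on version B (the rewrite author's own statement) =====
-- stated objective: alternative
-- what changed: Replaces the single loop with a running chromosome/counter state by a two-level group-then-enumerate traversal: scan out each maximal run of rows sharing a chromosome, then number that run 1..k; no cross-iteration counter or change-detection remains.
import Mathlib
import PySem

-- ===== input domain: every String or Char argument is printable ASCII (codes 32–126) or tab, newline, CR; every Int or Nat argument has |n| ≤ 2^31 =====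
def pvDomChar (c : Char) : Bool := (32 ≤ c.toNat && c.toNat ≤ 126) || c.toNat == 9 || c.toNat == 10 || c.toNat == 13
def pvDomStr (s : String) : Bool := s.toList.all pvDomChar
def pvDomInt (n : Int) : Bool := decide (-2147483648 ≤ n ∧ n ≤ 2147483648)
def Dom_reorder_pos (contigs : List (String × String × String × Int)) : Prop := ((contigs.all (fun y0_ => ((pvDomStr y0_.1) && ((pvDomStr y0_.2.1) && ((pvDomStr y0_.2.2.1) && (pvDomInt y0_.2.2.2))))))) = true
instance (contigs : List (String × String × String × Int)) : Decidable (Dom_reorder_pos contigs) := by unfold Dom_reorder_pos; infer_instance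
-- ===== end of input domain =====

-- B replaces A's running counter with reset-on-change by a group-then-enumerate traversal
-- (scan out each maximal same-chromosome run, number it 1..k); objective: alternative decomposition.

-- ===== PORT A =====
-- the loop body of A; state = (current_chrom, current_pos, new_contigs), exactly A's loop variables
def pvStepA (st : Option String × Int × List (String × String × String × Int))
    (row : String × String × String × Int) :
    Option String × Int × List (String × String × String × Int) :=
  let (currentChrom, currentPos, newContigs) := st
  let (chrom, contig, strand, _pos) := row
  let (currentChrom, currentPos) :=
    if some chrom ≠ currentChrom then (some chrom, (1 : Int)) else (currentChrom, currentPos)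
  (currentChrom, currentPos + 1, newContigs ++ [(chrom, contig, strand, currentPos)])

def reorder_pos (contigs : List (String × String × String × Int)) : List (String × String × String × Int) :=
  (contigs.foldl pvStepA (none, 1, [])).2.2

-- ===== PORT B =====
-- the inner 'for idx, row in enumerate(group, 1)' loop of Source B
def pvNumberFrom (i : Int) : List (String × String × String × Int) → List (String × String × String × Int)
  | [] => []
  | (chrom, contig, strand, _pos) :: t => (chrom, contig, strand, i) :: pvNumberFrom (i + 1) t

-- Source B's outer while loop: peel off the maximal run sharing the first chromosome, enumerate it from 1
def reorder_pos_alt : List (String × String × String × Int) → List (String × String × String × Int)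
  | [] => []
  | (key, contig, strand, pos) :: tl =>
    -- the head always belongs to the run, so the scan past the run continues on tl
    pvNumberFrom 1 (((key, contig, strand, pos) :: tl).takeWhile (fun r => r.1 == key)) ++
      reorder_pos_alt (tl.dropWhile (fun r => r.1 == key))
termination_by l => l.length
decreasing_by
  exact Nat.lt_succ_of_le (List.length_dropWhile_le _ _)

-- ===== PRECONDITION & SPEC =====
def Spec_reorder_pos (contigs : List (String × String × String × Int)) (out : List (String × String × String × Int)) : Prop := out = reorder_pos_alt contigs
instance (contigs : List (String × String × String × Int)) (out : List (String × String × String × Int)) : Decidable (Spec_reorder_pos contigs out) := by unfold Spec_reorder_pos; infer_instance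

-- ===== CLAIM (what is proved, stated in full; the proofs are below) =====
def Claim_equal_reorder_pos : Prop := ∀ (contigs : List (String × String × String × Int)), Dom_reorder_pos contigs → Spec_reorder_pos contigs (reorder_pos contigs)

-- ===== LEMMAS AND PROOFS =====

theorem pvStepA_eq (cur : Option String) (pos : Int)
    (acc : List (String × String × String × Int)) (chrom contig strand : String) (p : Int) :
    pvStepA (cur, pos, acc) (chrom, contig, strand, p) =
      if some chrom ≠ cur then (some chrom, 2, acc ++ [(chrom, contig, strand, 1)])
      else (cur, pos + 1, acc ++ [(chrom, contig, strand, pos)]) := by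
  by_cases h : some chrom ≠ cur <;> simp [pvStepA, h]

theorem alt_nil : reorder_pos_alt [] = [] := by
  simp [reorder_pos_alt]

theorem alt_cons (chrom contig strand : String) (p : Int)
    (t : List (String × String × String × Int)) :
    reorder_pos_alt ((chrom, contig, strand, p) :: t) =
      pvNumberFrom 1 (((chrom, contig, strand, p) :: t).takeWhile (fun r => r.1 == chrom)) ++
        reorder_pos_alt (t.dropWhile (fun r => r.1 == chrom)) := by
  rw [reorder_pos_alt]

-- recursive reformulation of A's loop (state-passing form of the fold)
def pvARec (cur : Option String) (pos : Int) : List (String × String × String × Int) → List (String × String × String × Int)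
  | [] => []
  | (chrom, contig, strand, _pos) :: t =>
    if some chrom ≠ cur then (chrom, contig, strand, 1) :: pvARec (some chrom) 2 t
    else (chrom, contig, strand, pos) :: pvARec cur (pos + 1) t

theorem pvFoldl_eq_aRec (l : List (String × String × String × Int)) :
    ∀ (cur : Option String) (pos : Int) (acc : List (String × String × String × Int)),
    (l.foldl pvStepA (cur, pos, acc)).2.2 = acc ++ pvARec cur pos l := by
  induction l with
  | nil => intro cur pos acc; simp [pvARec]
  | cons h t ih =>
    intro cur pos acc
    obtain ⟨chrom, contig, strand, p⟩ := h
    rw [List.foldl_cons, pvStepA_eq]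
    by_cases hc : some chrom ≠ cur
    · rw [if_pos hc, ih]; simp [pvARec, hc]
    · rw [if_neg hc, ih]; simp [pvARec, hc]

theorem pvARec_eq_alt (n : Nat) : ∀ (l : List (String × String × String × Int)), l.length ≤ n →
    ∀ (c : String) (pos : Int),
    pvARec (some c) pos l =
      pvNumberFrom pos (l.takeWhile (fun r => r.1 == c)) ++
        reorder_pos_alt (l.dropWhile (fun r => r.1 == c)) := by
  induction n with
  | zero =>
    intro l hl c pos
    have : l = [] := List.eq_nil_of_length_eq_zero (Nat.le_zero.mp hl)
    subst this; simp [pvARec, pvNumberFrom, alt_nil]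
  | succ n ih =>
    intro l hl c pos
    match l with
    | [] => simp [pvARec, pvNumberFrom, alt_nil]
    | (chrom, contig, strand, p) :: t =>
      by_cases hc : chrom = c
      · subst hc
        have hne : ¬ (some chrom ≠ some chrom) := by simp
        simp only [pvARec, hne, List.takeWhile, List.dropWhile]
        simp only [beq_self_eq_true, pvNumberFrom]
        rw [ih t (Nat.le_of_succ_le_succ hl) chrom (pos + 1)]
        simp
      · have hne : some chrom ≠ some c := by simp [hc]
        have hb : (chrom == c) = false := by simp [hc]
        simp only [pvARec, hne, ne_eq, not_false_eq_true, if_pos, List.takeWhile, List.dropWhile, hb]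
        simp only [pvNumberFrom, List.nil_append]
        rw [ih t (Nat.le_of_succ_le_succ hl) chrom 2, alt_cons]
        simp [List.takeWhile, pvNumberFrom]

-- ===== VERDICT (by name: the statement is the Claim_ definition above) =====
theorem reorder_pos_spec : Claim_equal_reorder_pos := by
  intro contigs _
  unfold Spec_reorder_pos reorder_pos
  rw [pvFoldl_eq_aRec]
  match contigs with
  | [] => simp [pvARec, alt_nil]
  | (chrom, contig, strand, p) :: t =>
    have hne : some chrom ≠ (none : Option String) := by simp
    simp only [pvARec, hne, ne_eq, not_false_eq_true, if_pos, List.nil_append]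
    rw [pvARec_eq_alt t.length t (Nat.le_refl _) chrom 2, alt_cons]
    simp [List.takeWhile, pvNumberFrom]
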